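-- pv_equiv track=rewrite | github.com/elektronicznypank/adventcode-2015 | day5/day5_david_version.py | check_if_nice_2
-- ===== SOURCE A (Python) =====
-- def check_if_nice_2(input):
--     has_two_consecutive_letters_separated = False
--
--     for index, letter in enumerate(input):
--         next_letter = initialize_nth_letter(1, input, index)
--         next_next_letter = initialize_nth_letter(2, input, index)
--
--         if letter == next_next_letter and letter != next_letter:
--             has_two_consecutive_letters_separated = True
--
--     return has_two_consecutive_letters_separated
--
-- def initialize_nth_letter(n, input, index):
--     if index < len(input) - n:
--         return input[index + n]
--
--     return None
-- ===== SOURCE B (Python) =====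
-- def check_if_nice_2(input):
--     evens, odds = input[::2], input[1::2]
--     return _gap_pair(evens, odds) or _gap_pair(odds, evens[1:])
--
-- def _gap_pair(run, mids):
--     return any(a == b and a != m for (a, b), m in zip(zip(run, run[1:]), mids))
-- ===== Notes on version B (the rewrite author's own statement) =====
-- stated objective: alternative
-- what changed: Replaces A's single indexed scan (enumerate with a None-returning bounds helper testing s[i]==s[i+2]) by a parity decomposition: split the string into the even- and odd-indexed subsequences and look for an adjacent equal pair within one parity class whose interleaved middle character differs.
import Mathlib
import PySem

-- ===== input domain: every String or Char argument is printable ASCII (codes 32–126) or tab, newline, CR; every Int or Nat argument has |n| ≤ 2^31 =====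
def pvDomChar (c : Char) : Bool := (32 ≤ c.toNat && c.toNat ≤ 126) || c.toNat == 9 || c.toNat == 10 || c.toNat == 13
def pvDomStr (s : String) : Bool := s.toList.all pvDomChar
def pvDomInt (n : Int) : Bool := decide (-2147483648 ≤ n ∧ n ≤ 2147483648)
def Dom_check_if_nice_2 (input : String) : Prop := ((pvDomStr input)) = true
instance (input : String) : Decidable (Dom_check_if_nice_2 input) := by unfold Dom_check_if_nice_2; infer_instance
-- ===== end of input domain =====

-- B replaces A's single indexed scan (enumerate + a None-returning bounds helper) by a parity
-- decomposition: a letter repeated with one char between is exactly an adjacent equal pair within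
-- the even- or odd-indexed subsequence whose interleaved middle char differs (alternative; same O(n)).

-- ===== PORT A =====
def initialize_nth_letter (n : Int) (input : List Char) (index : Int) : Option Char :=
  if index < (input.length : Int) - n then PySem.List.pyGet? input (index + n)
  else none

def check_if_nice_2 (input : String) : Bool :=
  (PySem.List.enumerate input.toList 0).foldl
    (fun flag p =>
      let next_letter := initialize_nth_letter 1 input.toList p.1
      let next_next_letter := initialize_nth_letter 2 input.toList p.1
      if (some p.2 == next_next_letter) && !(some p.2 == next_letter) then true else flag)
    false

-- ===== PORT B =====
-- _gap_pair(run, mids): any(a == b and a != m for (a, b), m in zip(zip(run, run[1:]), mids))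
def gap_pair (run : List Char) (mids : List Char) : Bool :=
  ((run.zip (PySem.List.slice run (some 1) none)).zip mids).any
    (fun t => t.1.1 == t.1.2 && !(t.1.1 == t.2))

def check_if_nice_2_alt (input : String) : Bool :=
  let l := input.toList
  let evens := (PySem.List.slice? l none none 2).getD []      -- input[::2] (step 2 never raises)
  let odds := (PySem.List.slice? l (some 1) none 2).getD []   -- input[1::2]
  gap_pair evens odds || gap_pair odds (PySem.List.slice evens (some 1) none)

-- ===== PRECONDITION & SPEC =====
def Spec_check_if_nice_2 (input : String) (out : Bool) : Prop := out = check_if_nice_2_alt input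
instance (input : String) (out : Bool) : Decidable (Spec_check_if_nice_2 input out) := by unfold Spec_check_if_nice_2; infer_instance

-- ===== CLAIM (what is proved, stated in full; the proofs are below) =====
def Claim_equal_check_if_nice_2 : Prop := ∀ (input : String), Dom_check_if_nice_2 input → Spec_check_if_nice_2 input (check_if_nice_2 input)

-- ===== LEMMAS AND PROOFS =====

-- ---- A's side: the fold is an 'any' over triples (as in the one-pass reading of A) ----
def pvCond (L : List Char) (p : Int × Char) : Bool :=
  (some p.2 == initialize_nth_letter 2 L p.1) && !(some p.2 == initialize_nth_letter 1 L p.1)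

def pvBany (l : List Char) : Bool :=
  ((l.zip (l.drop 1)).zip (l.drop 2)).any (fun t => t.1.1 == t.2 && !(t.1.1 == t.1.2))

theorem pvFoldlOr {α : Type} (c : α → Bool) (l : List α) (b : Bool) :
    l.foldl (fun flag p => if c p then true else flag) b = (b || l.any c) := by
  induction l generalizing b with
  | nil => simp
  | cons x xs ih => rw [List.foldl_cons, ih]; by_cases h : c x <;> simp [h]

theorem pvA_any (input : String) :
    check_if_nice_2 input = (PySem.List.enumerate input.toList 0).any (pvCond input.toList) := by
  unfold check_if_nice_2
  exact (pvFoldlOr (pvCond input.toList) _ false).trans (by simp)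

theorem pvInit_cons (n : Int) (x : Char) (L : List Char) (i : Int) (hi : 0 ≤ i) (hn : 0 ≤ n) :
    initialize_nth_letter n (x :: L) (i + 1) = initialize_nth_letter n L i := by
  unfold initialize_nth_letter
  obtain ⟨m, rfl⟩ := Int.eq_ofNat_of_zero_le hi
  obtain ⟨k, rfl⟩ := Int.eq_ofNat_of_zero_le hn
  have h1 : ((m : Int) + 1 + k) = ((m + 1 + k : Nat) : Int) := by push_cast; ring
  have h2 : ((m : Int) + k) = ((m + k : Nat) : Int) := by push_cast; ring
  rw [h1, h2, PySem.List.pyGet?_natCast, PySem.List.pyGet?_natCast]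
  have hlen : (x :: L).length = L.length + 1 := rfl
  by_cases h : (m : Int) < (L.length : Int) - (k : Int)
  · have h' : (m : Int) + 1 < ((x :: L).length : Int) - (k : Int) := by
      rw [hlen]; push_cast; omega
    rw [if_pos h', if_pos h]
    show (x :: L)[m + 1 + k]? = L[m + k]?
    simp [Nat.add_right_comm m 1 k]
  · have h' : ¬ ((m : Int) + 1 < ((x :: L).length : Int) - (k : Int)) := by
      rw [hlen]; push_cast at h ⊢; omega
    rw [if_neg h', if_neg h]

theorem pvCond_cons (x : Char) (L : List Char) (i : Int) (a : Char) (hi : 0 ≤ i) :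
    pvCond (x :: L) (i + 1, a) = pvCond L (i, a) := by
  unfold pvCond
  rw [pvInit_cons 1 x L i hi (by norm_num), pvInit_cons 2 x L i hi (by norm_num)]

theorem pvShift (M : List Char) (x : Char) (L : List Char) (s : Int) (hs : 0 ≤ s) :
    (PySem.List.enumerate M (s + 1)).any (pvCond (x :: L)) =
    (PySem.List.enumerate M s).any (pvCond L) := by
  induction M generalizing s with
  | nil => simp [PySem.List.enumerate_nil]
  | cons y ys ih =>
      rw [PySem.List.enumerate_cons, PySem.List.enumerate_cons, List.any_cons, List.any_cons,
        pvCond_cons x L s y hs, ih (s + 1) (by omega)]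

theorem pvCond_head_nil (x : Char) : pvCond [x] (0, x) = false := by
  simp [pvCond, initialize_nth_letter]

theorem pvCond_head_one (x b : Char) : pvCond [x, b] (0, x) = false := by
  simp [pvCond, initialize_nth_letter, PySem.List.pyGet?]

theorem pvCond_head (x b c : Char) (r : List Char) :
    pvCond (x :: b :: c :: r) (0, x) = ((x == c) && !(x == b)) := by
  unfold pvCond initialize_nth_letter
  have hlen : ((x :: b :: c :: r).length : Int) = (r.length : Int) + 3 := by simp; omega
  rw [hlen]
  rw [if_pos (by omega : (0:Int) < (r.length : Int) + 3 - 1),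
      if_pos (by omega : (0:Int) < (r.length : Int) + 3 - 2)]
  have f1 : (0:Int) ≤ (r.length : Int) + 1 := by omega
  have f2 : (2:Int) ≤ (r.length : Int) + 1 + 1 := by omega
  norm_num
  simp [f1, f2]

theorem pvMain (l : List Char) :
    (PySem.List.enumerate l 0).any (pvCond l) = pvBany l := by
  induction l with
  | nil => simp [PySem.List.enumerate_nil, pvBany]
  | cons x L ih =>
      rw [PySem.List.enumerate_cons, List.any_cons,
        show (0 : Int) + 1 = 0 + 1 from rfl, pvShift L x L 0 le_rfl, ih]
      match L with
      | [] => simp [pvBany, pvCond_head_nil]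
      | [b] => simp [pvBany, pvCond_head_one]
      | b :: c :: r =>
          rw [pvCond_head]
          simp [pvBany, List.zip]

-- ---- B's side: the step-2 slices are the structural even/odd subsequences ----
def pvEvens : List Char → List Char
  | [] => []
  | [x] => [x]
  | x :: _ :: r => x :: pvEvens r

theorem pvEvens_getElem? (l : List Char) (k : Nat) : (pvEvens l)[k]? = l[2*k]? := by
  induction l using pvEvens.induct generalizing k with
  | case1 => simp [pvEvens]
  | case2 x => cases k with
      | zero => simp [pvEvens]
      | succ k => simp [pvEvens]
  | case3 x y r ih =>
      cases k with
      | zero => simp [pvEvens]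
      | succ k =>
          simp only [pvEvens]
          rw [List.getElem?_cons_succ, ih]
          have h : 2 * (k+1) = (2*k)+1+1 := by omega
          rw [h, List.getElem?_cons_succ, List.getElem?_cons_succ]

theorem pvEvens_length (l : List Char) : (pvEvens l).length = (l.length + 1) / 2 := by
  induction l using pvEvens.induct with
  | case1 => simp [pvEvens]
  | case2 x => simp [pvEvens]
  | case3 x y r ih => simp [pvEvens, ih]; omega

def NiceAt (l : List Char) (j : Nat) : Prop :=
  j + 2 < l.length ∧ l[j]? = l[j+2]? ∧ l[j]? ≠ l[j+1]?

def gapAny (run mids : List Char) : Bool :=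
  ((run.zip run.tail).zip mids).any (fun t => t.1.1 == t.1.2 && !(t.1.1 == t.2))

theorem any_zip3 (as bs ms : List Char) (f : (Char × Char) × Char → Bool) :
    (((as.zip bs).zip ms).any f = true) ↔
      ∃ (i : Nat) (a b m : Char), as[i]? = some a ∧ bs[i]? = some b ∧ ms[i]? = some m ∧ f ((a, b), m) = true := by
  rw [List.any_eq_true]
  constructor
  · rintro ⟨x, hx, hf⟩
    obtain ⟨i, hi, hx'⟩ := List.mem_iff_getElem.1 hx
    rw [List.length_zip, List.length_zip] at hi
    rw [← hx'] at hf
    rw [List.getElem_zip, List.getElem_zip] at hf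
    exact ⟨i, as[i]'(by omega), bs[i]'(by omega), ms[i]'(by omega),
      List.getElem?_eq_getElem (by omega), List.getElem?_eq_getElem (by omega),
      List.getElem?_eq_getElem (by omega), hf⟩
  · rintro ⟨i, a, b, m, ha, hb, hm, hf⟩
    obtain ⟨h1, ha⟩ := List.getElem?_eq_some_iff.1 ha
    obtain ⟨h2, hb⟩ := List.getElem?_eq_some_iff.1 hb
    obtain ⟨h3, hm⟩ := List.getElem?_eq_some_iff.1 hm
    subst ha hb hm
    refine ⟨((as[i], bs[i]), ms[i]), ?_, hf⟩
    rw [List.mem_iff_getElem]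
    refine ⟨i, ?_, ?_⟩
    · rw [List.length_zip, List.length_zip]; omega
    · rw [List.getElem_zip, List.getElem_zip]

theorem pvBany_iff (l : List Char) : pvBany l = true ↔ ∃ j, NiceAt l j := by
  unfold pvBany
  rw [any_zip3]
  constructor
  · rintro ⟨i, a, b, m, ha, hb, hm, hf⟩
    rw [List.getElem?_drop] at hb hm
    simp only [Bool.and_eq_true, beq_iff_eq, Bool.not_eq_true', beq_eq_false_iff_ne] at hf
    have hlen := (List.getElem?_eq_some_iff.1 hm).1
    refine ⟨i, by omega, ?_, ?_⟩
    · rw [ha, show i + 2 = 2 + i from by omega, hm]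
      exact congrArg some hf.1
    · rw [ha, show i + 1 = 1 + i from by omega, hb]
      simp only [ne_eq, Option.some.injEq]
      exact hf.2
  · rintro ⟨j, hj, he, hne⟩
    have h0 : l[j]? = some (l[j]'(by omega)) := List.getElem?_eq_getElem (by omega)
    have h1 : l[j+1]? = some (l[j+1]'(by omega)) := List.getElem?_eq_getElem (by omega)
    have h2 : l[j+2]? = some (l[j+2]'(by omega)) := List.getElem?_eq_getElem (by omega)
    refine ⟨j, l[j]'(by omega), l[j+1]'(by omega), l[j+2]'(by omega), h0, ?_, ?_, ?_⟩
    · rw [List.getElem?_drop, show 1 + j = j + 1 from by omega]; exact h1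
    · rw [List.getElem?_drop, show 2 + j = j + 2 from by omega]; exact h2
    · simp only [Bool.and_eq_true, beq_iff_eq, Bool.not_eq_true', beq_eq_false_iff_ne]
      constructor
      · have := he; rw [h0, h2] at this; exact Option.some.inj this
      · intro hcontra
        apply hne
        rw [h0, h1]
        exact congrArg some hcontra

theorem pvTail_getElem? (l : List Char) (i : Nat) : l.tail[i]? = l[i+1]? := by
  rw [← List.drop_one, List.getElem?_drop, Nat.add_comm]

theorem gap_evens_iff (l : List Char) :
    gapAny (pvEvens l) (pvEvens l.tail) = true ↔ ∃ i, NiceAt l (2*i) := by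
  unfold gapAny
  rw [any_zip3]
  constructor
  · rintro ⟨i, a, b, m, ha, hb, hm, hf⟩
    rw [pvEvens_getElem?] at ha
    rw [pvTail_getElem?, pvEvens_getElem?, show 2*(i+1) = 2*i+2 from by omega] at hb
    rw [pvEvens_getElem?, pvTail_getElem?, show 2*i+1 = 2*i+1 from rfl] at hm
    simp only [Bool.and_eq_true, beq_iff_eq, Bool.not_eq_true', beq_eq_false_iff_ne] at hf
    have hlen := (List.getElem?_eq_some_iff.1 hb).1
    refine ⟨i, by omega, ?_, ?_⟩
    · rw [ha, hb]; exact congrArg some hf.1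
    · rw [ha, hm]; simp only [ne_eq, Option.some.injEq]; exact hf.2
  · rintro ⟨i, hj, he, hne⟩
    have h0 : l[2*i]? = some (l[2*i]'(by omega)) := List.getElem?_eq_getElem (by omega)
    have h1 : l[2*i+1]? = some (l[2*i+1]'(by omega)) := List.getElem?_eq_getElem (by omega)
    have h2 : l[2*i+2]? = some (l[2*i+2]'(by omega)) := List.getElem?_eq_getElem (by omega)
    refine ⟨i, l[2*i]'(by omega), l[2*i+2]'(by omega), l[2*i+1]'(by omega), ?_, ?_, ?_, ?_⟩
    · rw [pvEvens_getElem?]; exact h0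
    · rw [pvTail_getElem?, pvEvens_getElem?, show 2*(i+1) = 2*i+2 from by omega]; exact h2
    · rw [pvEvens_getElem?, pvTail_getElem?]; exact h1
    · simp only [Bool.and_eq_true, beq_iff_eq, Bool.not_eq_true', beq_eq_false_iff_ne]
      constructor
      · have := he; rw [h0, h2] at this; exact Option.some.inj this
      · intro hcontra
        apply hne
        rw [h0, h1]
        exact congrArg some hcontra

theorem gap_odds_iff (l : List Char) :
    gapAny (pvEvens l.tail) ((pvEvens l).tail) = true ↔ ∃ i, NiceAt l (2*i+1) := by
  unfold gapAny
  rw [any_zip3]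
  constructor
  · rintro ⟨i, a, b, m, ha, hb, hm, hf⟩
    rw [pvEvens_getElem?, pvTail_getElem?] at ha
    rw [pvTail_getElem?, pvEvens_getElem?, pvTail_getElem?,
      show 2*(i+1)+1 = (2*i+1)+2 from by omega] at hb
    rw [pvTail_getElem?, pvEvens_getElem?, show 2*(i+1) = (2*i+1)+1 from by omega] at hm
    simp only [Bool.and_eq_true, beq_iff_eq, Bool.not_eq_true', beq_eq_false_iff_ne] at hf
    have hlen := (List.getElem?_eq_some_iff.1 hb).1
    refine ⟨i, by omega, ?_, ?_⟩
    · rw [ha, hb]; exact congrArg some hf.1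
    · rw [ha, hm]; simp only [ne_eq, Option.some.injEq]; exact hf.2
  · rintro ⟨i, hj, he, hne⟩
    have h0 : l[2*i+1]? = some (l[2*i+1]'(by omega)) := List.getElem?_eq_getElem (by omega)
    have h1 : l[2*i+2]? = some (l[2*i+2]'(by omega)) := List.getElem?_eq_getElem (by omega)
    have h2 : l[2*i+3]? = some (l[2*i+3]'(by omega)) := List.getElem?_eq_getElem (by omega)
    refine ⟨i, l[2*i+1]'(by omega), l[2*i+3]'(by omega), l[2*i+2]'(by omega), ?_, ?_, ?_, ?_⟩
    · rw [pvEvens_getElem?, pvTail_getElem?]; exact h0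
    · rw [pvTail_getElem?, pvEvens_getElem?, pvTail_getElem?,
        show 2*(i+1)+1 = 2*i+3 from by omega]; exact h2
    · rw [pvTail_getElem?, pvEvens_getElem?, show 2*(i+1) = 2*i+2 from by omega]; exact h1
    · simp only [Bool.and_eq_true, beq_iff_eq, Bool.not_eq_true', beq_eq_false_iff_ne]
      constructor
      · have := he
        rw [h0, show (2*i+1)+2 = 2*i+3 from by omega, h2] at this
        exact Option.some.inj this
      · intro hcontra
        apply hne
        rw [h0, show (2*i+1)+1 = 2*i+2 from by omega, h1]
        exact congrArg some hcontra

theorem pvParity (l : List Char) :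
    (gapAny (pvEvens l) (pvEvens l.tail) || gapAny (pvEvens l.tail) ((pvEvens l).tail)) = pvBany l := by
  rw [Bool.eq_iff_iff, Bool.or_eq_true, gap_evens_iff, gap_odds_iff, pvBany_iff]
  constructor
  · rintro (⟨i, h⟩ | ⟨i, h⟩)
    · exact ⟨2*i, h⟩
    · exact ⟨2*i+1, h⟩
  · rintro ⟨j, h⟩
    rcases Nat.even_or_odd j with ⟨k, hk⟩ | ⟨k, hk⟩
    · exact Or.inl ⟨k, by rw [show 2*k = j from by omega]; exact h⟩
    · exact Or.inr ⟨k, by rw [show 2*k+1 = j from by omega]; exact h⟩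

theorem pvFilterMap_getElem?_range {α : Type} (l : List α) :
    (List.range l.length).filterMap (fun k => l[k]?) = l := by
  induction l with
  | nil => simp
  | cons x xs ih =>
      rw [List.length_cons, List.range_succ_eq_map, List.filterMap_cons,
        List.filterMap_map]
      simp only [List.getElem?_cons_zero, Function.comp]
      rw [show (fun k => (x :: xs)[k + 1]?) = fun k => xs[k]? from funext (fun k => List.getElem?_cons_succ), ih]

theorem pvSlice2_evens (l : List Char) :
    PySem.List.slice? l none none 2 = some (pvEvens l) := by
  unfold PySem.List.slice? PySem.List.sliceIndices
  norm_num
  have hc : (if 0 < l.length then (((l.length:Int) + 2 - 1) / 2).toNat else 0) = (pvEvens l).length := by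
    rw [pvEvens_length]; split_ifs with h <;> omega
  have hf : (fun (k : Nat) => l[((2:Int) * (k:Int)).toNat]?) = fun k => (pvEvens l)[k]? := by
    funext k
    rw [pvEvens_getElem?]
    congr 1
  rw [hc, hf, pvFilterMap_getElem?_range]

theorem pvSlice2_odds (l : List Char) :
    PySem.List.slice? l (some 1) none 2 = some (pvEvens l.tail) := by
  unfold PySem.List.slice? PySem.List.sliceIndices
  norm_num
  cases l with
  | nil => simp [pvEvens]
  | cons x r =>
      have hm : min 1 ((x :: r).length : Int) = 1 := by simp
      rw [hm]
      have hc : (if 1 < (x :: r).length then ((((x :: r).length:Int) - 1 + 2 - 1) / 2).toNat else 0)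
          = (pvEvens r).length := by
        rw [pvEvens_length]; simp only [List.length_cons]; split_ifs with h <;> push_cast <;> omega
      rw [hc,
        show (fun (k : Nat) => (x :: r)[((1:Int) + 2 * ↑k).toNat]?) = fun k => (pvEvens r)[k]? from
          funext (fun k => by
            rw [pvEvens_getElem?]
            have : ((1:Int) + 2 * ↑k).toNat = 2*k + 1 := by omega
            rw [this, List.getElem?_cons_succ]),
        pvFilterMap_getElem?_range]
      simp

theorem pvGap_pair_eq (run mids : List Char) : gap_pair run mids = gapAny run mids := by
  unfold gap_pair gapAny
  rw [PySem.List.slice_from_one]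

-- ===== VERDICT (by name: the statement is the Claim_ definition above) =====
theorem check_if_nice_2_spec : Claim_equal_check_if_nice_2 := by
  intro input _
  unfold Spec_check_if_nice_2
  rw [pvA_any, pvMain]
  simp only [check_if_nice_2_alt, pvSlice2_evens, pvSlice2_odds, Option.getD_some]
  rw [show PySem.List.slice (pvEvens input.toList) (some 1) none = (pvEvens input.toList).tail from
    PySem.List.slice_from_one _, pvGap_pair_eq, pvGap_pair_eq, pvParity]
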